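-- pv_equiv track=rewrite | github.com/DrJimFan/RealSynx | multiplex.py | parse_nums
-- ===== SOURCE A (Python) =====
-- def parse_nums(spec):
--     """
--     2-7: a range of ids, both ends inclusive
--     2,5,9: comma separated
--     1-100^42-45: exclude a range of numbers
--     1-100^42^52^62: exclude a few numbers
--     1-6,3-8,100: mixture of range and commas
--     1-100^42^55,301,305,400-500^420-430: arbitrarily complicated ranges
--     """
--     spec = spec.strip()
--     try:
--         if ',' in spec:
--             nums = []
--             for sub in spec.split(','):
--                 nums.extend(parse_nums(sub))
--             # remove duplicates
--             return sorted(list(set(nums)))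
--         elif '^' in spec:
--             # everything after the first ^ are to be excluded
--             subs = spec.split('^')
--             assert len(subs) >= 2, '[initial]^[exclude]'
--             include = set(parse_nums(subs[0]))
--             for sub in subs[1:]:
--                 include -= set(parse_nums(sub))
--             return sorted(list(include))
--         elif '-' in spec:
--             ends = list(map(int, filter(None, spec.split('-'))))
--             assert len(ends) == 2, 'range `x-y` must have exactly one hyphen: '+spec
--             assert ends[0] <= ends[1], 'end point must >= start point: '+spec
--             return list(range(ends[0], ends[1]+1))
--         else:
--             return [int(spec)]
--     except ValueError:
--         raise ValueError('Invalid number spec. Example: 1-100^42^55,200-300,309')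
-- ===== SOURCE B (Python) =====
-- def _atom(sub):
--     # one include/exclude item: a 'x-y' range or a single int, as a set
--     if '-' in sub:
--         ends = list(map(int, filter(None, sub.split('-'))))
--         assert len(ends) == 2, 'range `x-y` must have exactly one hyphen: ' + sub
--         assert ends[0] <= ends[1], 'end point must >= start point: ' + sub
--         return set(range(ends[0], ends[1] + 1))
--     return {int(sub)}
--
--
-- def parse_nums(spec):
--     """
--     2-7: a range of ids, both ends inclusive
--     2,5,9: comma separated
--     1-100^42-45: exclude a range of numbers
--     1-100^42^52^62: exclude a few numbers
--     1-6,3-8,100: mixture of range and commas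
--     1-100^42^55,301,305,400-500^420-430: arbitrarily complicated ranges
--     """
--     try:
--         result = set()
--         for part in spec.strip().split(','):
--             subs = part.strip().split('^')
--             include = _atom(subs[0].strip())
--             for ex in subs[1:]:
--                 include -= _atom(ex.strip())
--             result |= include
--         return sorted(result)
--     except ValueError:
--         raise ValueError('Invalid number spec. Example: 1-100^42^55,200-300,309')
-- ===== Notes on version B (the rewrite author's own statement) =====
-- stated objective: simpler
-- what changed: A's self-recursive dispatch (re-entering parse_nums for every comma part and caret piece) is flattened into explicit loops over the fixed three-level grammar (comma parts, caret exclusions, range/int atoms), accumulating one result set and sorting once at the end.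
import Mathlib
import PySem

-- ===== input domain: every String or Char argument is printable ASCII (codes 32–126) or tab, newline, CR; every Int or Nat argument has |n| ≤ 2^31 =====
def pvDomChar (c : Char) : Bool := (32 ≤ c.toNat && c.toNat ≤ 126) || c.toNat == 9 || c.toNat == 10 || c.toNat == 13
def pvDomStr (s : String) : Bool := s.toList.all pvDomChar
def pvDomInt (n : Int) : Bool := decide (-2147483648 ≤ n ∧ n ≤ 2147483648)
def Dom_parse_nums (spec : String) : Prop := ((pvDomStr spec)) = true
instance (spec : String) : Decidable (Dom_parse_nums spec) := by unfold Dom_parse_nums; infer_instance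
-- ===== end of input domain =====

-- B replaces A's self-recursion by one pass of explicit loops over the fixed three-level
-- grammar (comma parts / caret exclusions / range-or-int atoms), accumulating one set.

-- ===== PORT A =====
-- Literal port of A's recursive function; the Nat fuel only makes the recursion structural
-- (it is never exhausted on inputs where the Python returns; `none` = the Python raises).
-- `',' in spec` on a one-character needle is exactly char membership in the char list.
def parseA : Nat → List Char → Option (List Int)
  | 0, _ => none
  | fuel+1, spec0 =>
    let spec := PySem.Chars.strip spec0
    if ',' ∈ spec then
      match (PySem.Chars.splitOn spec [',']).foldl
          (fun nums sub => match nums with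
            | none => none
            | some ns => (parseA fuel sub).map (fun r => ns ++ r))
          (some ([] : List Int)) with
      | none => none
      | some nums => some (PySem.List.sorted (PySem.Set.ofList nums) (fun x => x) false)
    else if '^' ∈ spec then
      let subs := PySem.Chars.splitOn spec ['^']
      if 2 ≤ subs.length then  -- assert len(subs) >= 2
        match subs with
        | [] => none  -- unreachable (splitOn is never empty)
        | s0 :: rest =>
          match parseA fuel s0 with
          | none => none
          | some inc0 =>
            match rest.foldl
                (fun inc sub => match inc with
                  | none => none
                  | some i => (parseA fuel sub).map
                      (fun r => PySem.Set.diff i (PySem.Set.ofList r)))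
                (some (PySem.Set.ofList inc0)) with
            | none => none
            | some incl => some (PySem.List.sorted incl (fun x => x) false)
      else none  -- AssertionError
    else if '-' ∈ spec then
      match ((PySem.Chars.splitOn spec ['-']).filter (fun p => !p.isEmpty)).mapM
          PySem.Int.ofChars? with
      | none => none  -- ValueError from int()
      | some ends =>
        match ends with
        | [a, b] => if a ≤ b then some (PySem.List.pyRange a (b + 1) 1) else none
        | _ => none  -- AssertionError: len(ends) == 2
    else (PySem.Int.ofChars? spec).map (fun n => [n])

def parse_nums (spec : String) : List Int :=
  (parseA (spec.toList.length + 3) spec.toList).getD []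

-- ===== PORT B =====
-- _atom of Source B: one range/int item as a set
def pvAtomB (sub : List Char) : Option (PySem.Set Int) :=
  if '-' ∈ sub then
    match ((PySem.Chars.splitOn sub ['-']).filter (fun p => !p.isEmpty)).mapM
        PySem.Int.ofChars? with
    | none => none  -- ValueError from int()
    | some ends =>
      match ends with
      | [a, b] =>
        if a ≤ b then some (PySem.Set.ofList (PySem.List.pyRange a (b + 1) 1)) else none
      | _ => none  -- AssertionError
  else (PySem.Int.ofChars? sub).map (fun n => PySem.Set.ofList [n])

def parse_nums_alt (spec : String) : List Int :=
  let body :=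
    (PySem.Chars.splitOn (PySem.Chars.strip spec.toList) [',']).foldl
      (fun acc part => match acc with
        | none => none
        | some res =>
          match PySem.Chars.splitOn (PySem.Chars.strip part) ['^'] with
          | [] => none  -- unreachable (splitOn is never empty)
          | q0 :: rest =>
            match pvAtomB (PySem.Chars.strip q0) with
            | none => none
            | some inc0 =>
              (rest.foldl
                  (fun inc ex => match inc with
                    | none => none
                    | some i => (pvAtomB (PySem.Chars.strip ex)).map
                        (fun e => PySem.Set.diff i e))
                  (some inc0)).map (fun inc => PySem.Set.union res inc))
      (some (PySem.Set.empty : PySem.Set Int))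
  match body with
  | none => []  -- the Python raises here (outside Pre_)
  | some res => PySem.List.sorted res (fun x => x) false

-- ===== PRECONDITION & SPEC =====
-- one atom (a stripped caret-piece) parses: a two-ended ordered range or a single int
def pvAtomOK (t : List Char) : Bool :=
  if '-' ∈ t then
    match ((PySem.Chars.splitOn t ['-']).filter (fun p => !p.isEmpty)).mapM
        PySem.Int.ofChars? with
    | some [a, b] => decide (a ≤ b)
    | _ => false
  else (PySem.Int.ofChars? t).isSome

-- Pre_ = exactly the inputs on which the Python A returns normally (no ValueError /
-- AssertionError): every comma part's every caret piece is a valid ordered range or int.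
def Pre_parse_nums (spec : String) : Prop :=
  ((PySem.Chars.splitOn (PySem.Chars.strip spec.toList) [',']).all (fun p =>
    (PySem.Chars.splitOn (PySem.Chars.strip p) ['^']).all (fun q =>
      pvAtomOK (PySem.Chars.strip q)))) = true

instance (spec : String) : Decidable (Pre_parse_nums spec) := by
  unfold Pre_parse_nums; infer_instance

def pvWitness_parse_nums : String := "1-5^2, 8,10-12"

def Spec_parse_nums (spec : String) (out : List Int) : Prop := out = parse_nums_alt spec
instance (spec : String) (out : List Int) : Decidable (Spec_parse_nums spec out) := by
  unfold Spec_parse_nums; infer_instance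

-- ===== CLAIM (what is proved, stated in full; the proofs are below) =====
def Claim_equal_parse_nums : Prop :=
  ∀ (spec : String), Dom_parse_nums spec → Pre_parse_nums spec →
    Spec_parse_nums spec (parse_nums spec)

-- ===== LEMMAS AND PROOFS =====

theorem go_nosep (c : Char) : ∀ (fuel : Nat) (l cur : List Char) (acc : List (List Char)),
    l.length < fuel → c ∉ l →
    PySem.Chars.splitOn.go [c] fuel l cur acc = ((cur.reverse ++ l) :: acc).reverse := by
  intro fuel
  induction fuel with
  | zero => intro l cur acc h _; omega
  | succ f ih =>
    intro l cur acc hlen hc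
    cases l with
    | nil => rw [PySem.Chars.splitOn.go]; simp; omega
    | cons a rest =>
      rw [PySem.Chars.splitOn.go]
      have hca : ¬ (c = a) := fun h => hc (h ▸ List.mem_cons_self)
      have hpre : [c].isPrefixOf (a :: rest) = false := by
        simp [List.isPrefixOf]; exact hca
      rw [hpre]
      simp only [Bool.false_eq_true, if_false]
      rw [ih rest (a :: cur) acc (by simpa using Nat.lt_of_succ_lt_succ hlen) (fun h => hc (List.mem_cons_of_mem _ h))]
      simp

theorem go_mem (c : Char) : ∀ (fuel : Nat) (l cur : List Char) (acc : List (List Char))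
    (q : List Char), q ∈ PySem.Chars.splitOn.go [c] fuel l cur acc →
    ∀ x ∈ q, x ∈ l ∨ x ∈ cur ∨ ∃ p ∈ acc, x ∈ p := by
  intro fuel
  induction fuel with
  | zero =>
    intro l cur acc q hq x hx
    rw [PySem.Chars.splitOn.go] at hq
    simp at hq
    rcases hq with h | h
    · exact Or.inr (Or.inr ⟨q, h, hx⟩)
    · subst h; rcases List.mem_append.1 hx with h | h
      · exact Or.inr (Or.inl (List.mem_reverse.1 h))
      · exact Or.inl h
  | succ f ih =>
    intro l cur acc q hq x hx
    cases l with
    | nil =>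
      rw [PySem.Chars.splitOn.go] at hq
      simp at hq
      rcases hq with h | h
      · exact Or.inr (Or.inr ⟨q, h, hx⟩)
      · subst h; exact Or.inr (Or.inl (List.mem_reverse.1 hx))
      · omega
    | cons a rest =>
      rw [PySem.Chars.splitOn.go] at hq
      by_cases hpre : [c].isPrefixOf (a :: rest) = true
      · rw [if_pos hpre] at hq
        simp only [List.length_cons, List.length_nil, List.drop_succ_cons,
          List.drop_zero] at hq
        rcases ih _ _ _ _ hq x hx with h | h | ⟨p, hp, hxp⟩
        · exact Or.inl (List.mem_cons_of_mem _ h)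
        · exact absurd h List.not_mem_nil
        · rcases List.mem_cons.1 hp with rfl | hp'
          · exact Or.inr (Or.inl (List.mem_reverse.1 hxp))
          · exact Or.inr (Or.inr ⟨p, hp', hxp⟩)
      · rw [if_neg hpre] at hq
        have := ih _ _ _ _ hq x hx
        rcases this with h | h | h
        · exact Or.inl (List.mem_cons_of_mem _ h)
        · rcases List.mem_cons.1 h with h | h
          · exact Or.inl (h ▸ List.mem_cons_self)
          · exact Or.inr (Or.inl h)
        · exact Or.inr (Or.inr h)

theorem go_sepfree (c : Char) : ∀ (fuel : Nat) (l cur : List Char) (acc : List (List Char)),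
    l.length < fuel → c ∉ cur → (∀ p ∈ acc, c ∉ p) →
    ∀ q ∈ PySem.Chars.splitOn.go [c] fuel l cur acc, c ∉ q := by
  intro fuel
  induction fuel with
  | zero => intro l cur acc h; omega
  | succ f ih =>
    intro l cur acc hlen hcur hacc q hq
    cases l with
    | nil =>
      rw [PySem.Chars.splitOn.go] at hq
      simp at hq
      rcases hq with h | h
      · exact hacc q h
      · subst h; exact fun hx => hcur (List.mem_reverse.1 hx)
      · omega
    | cons a rest =>
      rw [PySem.Chars.splitOn.go] at hq
      by_cases hpre : [c].isPrefixOf (a :: rest) = true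
      · rw [if_pos hpre] at hq
        simp only [List.length_cons, List.length_nil, List.drop_succ_cons,
          List.drop_zero] at hq
        refine ih rest [] (cur.reverse :: acc) (by simpa using Nat.lt_of_succ_lt_succ hlen)
          (by simp) ?_ q hq
        intro p hp
        rcases List.mem_cons.1 hp with rfl | hp'
        · exact fun hx => hcur (List.mem_reverse.1 hx)
        · exact hacc p hp'
      · rw [if_neg hpre] at hq
        have hca : c ≠ a := by
          intro h; subst h; simp [List.isPrefixOf] at hpre
        refine ih rest (a :: cur) acc (by simpa using Nat.lt_of_succ_lt_succ hlen) ?_ hacc q hq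
        intro hx
        rcases List.mem_cons.1 hx with h | h
        · exact hca h
        · exact hcur h

theorem go_len1 (c : Char) : ∀ (fuel : Nat) (l cur : List Char) (acc : List (List Char)),
    acc.length + 1 ≤ (PySem.Chars.splitOn.go [c] fuel l cur acc).length := by
  intro fuel
  induction fuel with
  | zero => intro l cur acc; rw [PySem.Chars.splitOn.go]; simp
  | succ f ih =>
    intro l cur acc
    cases l with
    | nil => rw [PySem.Chars.splitOn.go]; simp; omega
    | cons a rest =>
      rw [PySem.Chars.splitOn.go]
      by_cases hpre : [c].isPrefixOf (a :: rest) = true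
      · rw [if_pos hpre]
        have := ih (List.drop [c].length (a :: rest)) [] (cur.reverse :: acc)
        simp at this ⊢
        omega
      · rw [if_neg hpre]
        exact ih rest (a :: cur) acc

theorem go_len2 (c : Char) : ∀ (fuel : Nat) (l cur : List Char) (acc : List (List Char)),
    l.length < fuel → c ∈ l →
    acc.length + 2 ≤ (PySem.Chars.splitOn.go [c] fuel l cur acc).length := by
  intro fuel
  induction fuel with
  | zero => intro l cur acc h; omega
  | succ f ih =>
    intro l cur acc hlen hc
    cases l with
    | nil => exact absurd hc List.not_mem_nil
    | cons a rest =>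
      rw [PySem.Chars.splitOn.go]
      by_cases hpre : [c].isPrefixOf (a :: rest) = true
      · rw [if_pos hpre]
        have := go_len1 c f (List.drop [c].length (a :: rest)) [] (cur.reverse :: acc)
        simp at this ⊢
        omega
      · rw [if_neg hpre]
        have hca : c ≠ a := by
          intro h; subst h; simp [List.isPrefixOf] at hpre
        have hcr : c ∈ rest := by
          rcases List.mem_cons.1 hc with h | h
          · exact absurd h hca
          · exact h
        exact ih rest (a :: cur) acc (by simpa using Nat.lt_of_succ_lt_succ hlen) hcr

theorem splitOn_nosep {c : Char} {l : List Char} (h : c ∉ l) :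
    PySem.Chars.splitOn l [c] = [l] := by
  rw [PySem.Chars.splitOn, go_nosep c (l.length + 1) l [] [] (by omega) h]
  simp

theorem splitOn_subset {c : Char} {l q : List Char} (hq : q ∈ PySem.Chars.splitOn l [c]) :
    ∀ x ∈ q, x ∈ l := by
  intro x hx
  rw [PySem.Chars.splitOn] at hq
  rcases go_mem c (l.length + 1) l [] [] q hq x hx with h | h | ⟨p, hp, _⟩
  · exact h
  · exact absurd h List.not_mem_nil
  · exact absurd hp List.not_mem_nil

theorem splitOn_sepfree {c : Char} {l q : List Char} (hq : q ∈ PySem.Chars.splitOn l [c]) :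
    c ∉ q := by
  rw [PySem.Chars.splitOn] at hq
  exact go_sepfree c (l.length + 1) l [] [] (by omega) List.not_mem_nil
    (fun p hp => absurd hp List.not_mem_nil) q hq

theorem splitOn_len2 {c : Char} {l : List Char} (h : c ∈ l) :
    2 ≤ (PySem.Chars.splitOn l [c]).length := by
  rw [PySem.Chars.splitOn]
  simpa using go_len2 c (l.length + 1) l [] [] (by omega) h

theorem strip_subset {l : List Char} : ∀ x ∈ PySem.Chars.strip l, x ∈ l := by
  intro x hx
  simp only [PySem.Chars.strip, PySem.Chars.rstrip, PySem.Chars.lstrip] at hx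
  have h1 := List.mem_reverse.1 hx
  have h2 := (List.dropWhile_suffix _).subset h1
  have h3 := List.mem_reverse.1 h2
  exact (List.dropWhile_suffix _).subset h3

theorem lstrip_rstrip (u : List Char) (h : PySem.Chars.lstrip u = u) :
    PySem.Chars.lstrip (PySem.Chars.rstrip u) = PySem.Chars.rstrip u := by
  have hpre : PySem.Chars.rstrip u <+: u := by
    simpa [PySem.Chars.rstrip] using
      List.reverse_prefix.mpr (List.dropWhile_suffix (l := u.reverse) PySem.Chars.isspace)
  cases hr : PySem.Chars.rstrip u with
  | nil => simp [PySem.Chars.lstrip]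
  | cons a v =>
    rw [hr] at hpre
    obtain ⟨s, hs⟩ := hpre
    have hpa : PySem.Chars.isspace a = false := by
      by_contra hpa
      have hpa' : PySem.Chars.isspace a = true := by
        cases hb : PySem.Chars.isspace a
        · exact absurd hb hpa
        · rfl
      have := congrArg List.length h
      rw [← hs] at this
      simp only [PySem.Chars.lstrip, List.cons_append,
        List.dropWhile_cons_of_pos hpa', List.length_cons, List.length_append] at this
      have h2 := List.length_dropWhile_le PySem.Chars.isspace (v ++ s)
      simp only [List.length_append] at h2
      omega
    simp [PySem.Chars.lstrip, List.dropWhile_cons_of_neg (by simp [hpa] : ¬ PySem.Chars.isspace a = true)]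

theorem rstrip_idem (w : List Char) :
    PySem.Chars.rstrip (PySem.Chars.rstrip w) = PySem.Chars.rstrip w := by
  simp [PySem.Chars.rstrip, List.dropWhile_idempotent]

theorem strip_idem (l : List Char) :
    PySem.Chars.strip (PySem.Chars.strip l) = PySem.Chars.strip l := by
  show PySem.Chars.rstrip (PySem.Chars.lstrip (PySem.Chars.rstrip (PySem.Chars.lstrip l)))
      = PySem.Chars.rstrip (PySem.Chars.lstrip l)
  rw [lstrip_rstrip (PySem.Chars.lstrip l) (by simp [PySem.Chars.lstrip, List.dropWhile_idempotent]),
    rstrip_idem]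

theorem foldl_add_eq_append {l : List Int} : ∀ (acc : List Int), (acc ++ l).Nodup →
    l.foldl PySem.Set.add acc = acc ++ l := by
  induction l with
  | nil => intro acc _; simp
  | cons x xs ih =>
    intro acc hnd
    have hx : x ∉ acc := by
      intro hx
      exact (List.disjoint_of_nodup_append hnd) hx List.mem_cons_self
    have hadd : PySem.Set.add acc x = acc ++ [x] := by
      simp [PySem.Set.add, hx]
    rw [List.foldl_cons, hadd, ih (acc ++ [x]) (by simpa using hnd)]
    simp

theorem ofList_eq_self {l : List Int} (h : l.Nodup) : PySem.Set.ofList l = l := by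
  rw [PySem.Set.ofList_eq_foldl]
  simpa using foldl_add_eq_append [] (by simpa using h)

-- the non-recursive tail of A (its '-' / int branches), as a named value for the proofs
def atomA (t : List Char) : Option (List Int) :=
  if '-' ∈ t then
    match ((PySem.Chars.splitOn t ['-']).filter (fun p => !p.isEmpty)).mapM
        PySem.Int.ofChars? with
    | none => none
    | some ends =>
      match ends with
      | [a, b] => if a ≤ b then some (PySem.List.pyRange a (b + 1) 1) else none
      | _ => none
  else (PySem.Int.ofChars? t).map (fun n => [n])

-- B's per-comma-part set, as a named value for the proofs
def partB (p : List Char) : Option (PySem.Set Int) :=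
  match PySem.Chars.splitOn (PySem.Chars.strip p) ['^'] with
  | [] => none
  | q0 :: rest =>
    match pvAtomB (PySem.Chars.strip q0) with
    | none => none
    | some inc0 =>
      rest.foldl
        (fun inc ex => match inc with
          | none => none
          | some i => (pvAtomB (PySem.Chars.strip ex)).map (fun e => PySem.Set.diff i e))
        (some inc0)

theorem atomA_pairwise {t : List Char} {l : List Int} (h : atomA t = some l) :
    l.Pairwise (· < ·) := by
  unfold atomA at h
  by_cases hd : '-' ∈ t
  · rw [if_pos hd] at h
    cases hm : ((PySem.Chars.splitOn t ['-']).filter (fun p => !p.isEmpty)).mapM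
        PySem.Int.ofChars? with
    | none => rw [hm] at h; exact absurd h (by simp)
    | some ends =>
      rw [hm] at h
      match ends with
      | [] => exact absurd h (by simp)
      | [a] => exact absurd h (by simp)
      | [a, b] =>
        by_cases hab : a ≤ b
        · simp only [hab, if_true] at h
          rw [← Option.some_inj.mp h]
          exact PySem.List.pairwise_lt_pyRange_one a (b + 1)
        · simp [hab] at h
      | a :: b :: c :: r => exact absurd h (by simp)
  · rw [if_neg hd] at h
    cases hn : PySem.Int.ofChars? t with
    | none => rw [hn] at h; exact absurd h (by simp)
    | some n => rw [hn] at h; cases h; simp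

theorem atomB_eq (t : List Char) : pvAtomB t = (atomA t).map PySem.Set.ofList := by
  unfold pvAtomB atomA
  by_cases hd : '-' ∈ t
  · rw [if_pos hd, if_pos hd]
    cases hm : ((PySem.Chars.splitOn t ['-']).filter (fun p => !p.isEmpty)).mapM
        PySem.Int.ofChars? with
    | none => simp
    | some ends =>
      match ends with
      | [] => simp
      | [a] => simp
      | [a, b] => by_cases hab : a ≤ b <;> simp [hab]
      | a :: b :: c :: r => simp
  · rw [if_neg hd, if_neg hd]
    cases hn : PySem.Int.ofChars? t <;> simp

theorem parseA_atom (f : Nat) (s : List Char)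
    (h1 : ',' ∉ PySem.Chars.strip s) (h2 : '^' ∉ PySem.Chars.strip s) :
    parseA (f + 1) s = atomA (PySem.Chars.strip s) := by
  rw [parseA]
  simp only [if_neg h1, if_neg h2]
  rfl

theorem pvAtomB_nodup {t : List Char} {S : PySem.Set Int} (h : pvAtomB t = some S) :
    S.Nodup := by
  rw [atomB_eq] at h
  cases ha : atomA t with
  | none => rw [ha] at h; simp at h
  | some l =>
    rw [ha] at h
    simp only [Option.map_some, Option.some_inj] at h
    rw [← h]
    exact PySem.Set.nodup_ofList l

theorem foldl_diff_nodup (rest : List (List Char)) :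
    ∀ (o : Option (PySem.Set Int)), (∀ T, o = some T → T.Nodup) →
    ∀ S, rest.foldl (fun inc ex => match inc with
        | none => none
        | some i => (pvAtomB (PySem.Chars.strip ex)).map
            (fun e => PySem.Set.diff i e)) o = some S →
    S.Nodup := by
  induction rest with
  | nil => intro o ho S h; exact ho S (by simpa using h)
  | cons ex rest ih =>
    intro o ho S h
    rw [List.foldl_cons] at h
    apply ih _ _ S h
    intro T hT
    cases o with
    | none => simp at hT
    | some i =>
      cases hb : pvAtomB (PySem.Chars.strip ex) with
      | none => simp [hb] at hT
      | some e =>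
        simp only [hb, Option.map_some, Option.some_inj] at hT
        rw [← hT]
        exact PySem.Set.nodup_diff i e (ho i rfl)

theorem partB_nodup {p : List Char} {S : PySem.Set Int} (h : partB p = some S) :
    S.Nodup := by
  unfold partB at h
  cases hsp : PySem.Chars.splitOn (PySem.Chars.strip p) ['^'] with
  | nil => rw [hsp] at h; simp at h
  | cons q0 rest =>
    rw [hsp] at h
    cases hb : pvAtomB (PySem.Chars.strip q0) with
    | none => simp [hb] at h
    | some inc0 =>
      simp only [hb] at h
      exact foldl_diff_nodup rest (some inc0)
        (fun T hT => by cases hT; exact pvAtomB_nodup hb) S h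

theorem match_map_sorted (o : Option (PySem.Set Int)) :
    (match o with
      | none => none
      | some incl => some (PySem.List.sorted incl (fun x => x) false)) =
    o.map (fun S => PySem.List.sorted S (fun x => x) false) := by
  cases o <;> rfl

theorem parseA_part (f : Nat) (p : List Char) (h : ',' ∉ PySem.Chars.strip p) :
    parseA (f + 2) p = (partB p).map
      (fun S => if '^' ∈ PySem.Chars.strip p
                then PySem.List.sorted S (fun x => x) false else S) := by
  by_cases hcar : '^' ∈ PySem.Chars.strip p
  · rw [show f + 2 = (f + 1) + 1 from rfl, parseA]
    simp only [if_neg h, if_pos hcar]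
    have hlen := splitOn_len2 hcar
    rw [if_pos hlen]
    unfold partB
    cases hsp : PySem.Chars.splitOn (PySem.Chars.strip p) ['^'] with
    | nil => rw [hsp] at hlen; simp at hlen
    | cons q0 rest =>
      have hq0mem : q0 ∈ PySem.Chars.splitOn (PySem.Chars.strip p) ['^'] := by
        rw [hsp]; exact List.mem_cons_self
      have hq0c : ',' ∉ PySem.Chars.strip q0 :=
        fun hx => h (splitOn_subset hq0mem ',' (strip_subset ',' hx))
      have hq0s : '^' ∉ PySem.Chars.strip q0 :=
        fun hx => splitOn_sepfree hq0mem (strip_subset '^' hx)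
      simp only [atomB_eq]
      rw [parseA_atom f q0 hq0c hq0s]
      cases ha0 : atomA (PySem.Chars.strip q0) with
      | none => simp
      | some l0 =>
        simp only [Option.map_some]
        have hfold :
            rest.foldl (fun inc sub => match inc with
              | none => none
              | some i => (parseA (f + 1) sub).map
                  (fun r => PySem.Set.diff i (PySem.Set.ofList r)))
              (some (PySem.Set.ofList l0)) =
            rest.foldl (fun inc ex => match inc with
              | none => none
              | some i => ((atomA (PySem.Chars.strip ex)).map PySem.Set.ofList).map
                  (fun e => PySem.Set.diff i e))
              (some (PySem.Set.ofList l0)) := by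
          apply PySem.List.foldl_congr_mem
          intro acc sub hsub
          cases acc with
          | none => rfl
          | some i =>
            have hsmem : sub ∈ PySem.Chars.splitOn (PySem.Chars.strip p) ['^'] := by
              rw [hsp]; exact List.mem_cons_of_mem q0 hsub
            have hsc : ',' ∉ PySem.Chars.strip sub :=
              fun hx => h (splitOn_subset hsmem ',' (strip_subset ',' hx))
            have hss : '^' ∉ PySem.Chars.strip sub :=
              fun hx => splitOn_sepfree hsmem (strip_subset '^' hx)
            rw [parseA_atom f sub hsc hss]
            cases atomA (PySem.Chars.strip sub) <;> rfl
        rw [hfold]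
        exact match_map_sorted _
  · rw [show f + 2 = (f + 1) + 1 from rfl, parseA_atom (f + 1) p h hcar]
    unfold partB
    rw [splitOn_nosep hcar]
    simp only [List.foldl_nil, strip_idem, atomB_eq]
    cases ha : atomA (PySem.Chars.strip p) with
    | none => simp
    | some l =>
      have hnd : l.Nodup := (atomA_pairwise ha).imp (fun hlt => ne_of_lt hlt)
      simp [if_neg hcar, ofList_eq_self hnd]

theorem sorted_eq_of_nodup_mem_equiv {X Y : List Int} (hX : X.Nodup) (hY : Y.Nodup)
    (h : ∀ x, x ∈ X ↔ x ∈ Y) :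
    PySem.List.sorted X (fun x => x) false = PySem.List.sorted Y (fun x => x) false := by
  have hperm : Y.Perm X := (List.perm_ext_iff_of_nodup hY hX).mpr (fun a => (h a).symm)
  have hZperm : (PySem.List.sorted Y (fun x => x) false).Perm Y :=
    PySem.List.sorted_perm Y (fun x => x) false
  have hpair : (PySem.List.sorted Y (fun x => x) false).Pairwise (· < ·) := by
    have := PySem.List.sorted_ofList_pairwise_lt Y
    rwa [ofList_eq_self hY] at this
  exact PySem.List.sorted_eq_of_perm_of_pairwise_lt X
    (PySem.List.sorted Y (fun x => x) false) (fun x => x) (hZperm.trans hperm) hpair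

def stepB (acc : Option (PySem.Set Int)) (part : List Char) : Option (PySem.Set Int) :=
  match acc with
  | none => none
  | some res => (partB part).map (fun S => PySem.Set.union res S)

theorem partB_nocaret_pairwise {p : List Char} {S : PySem.Set Int}
    (hcar : '^' ∉ PySem.Chars.strip p) (h : partB p = some S) : S.Pairwise (· < ·) := by
  unfold partB at h
  rw [splitOn_nosep hcar] at h
  simp only [List.foldl_nil, strip_idem, atomB_eq] at h
  cases ha : atomA (PySem.Chars.strip p) with
  | none => rw [ha] at h; simp at h
  | some l =>
    rw [ha] at h
    simp only [Option.map_some, Option.some_inj] at h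
    have hpl := atomA_pairwise ha
    rw [← h, ofList_eq_self (hpl.imp (fun hlt => ne_of_lt hlt))]
    exact hpl

theorem foldlA_none (f : Nat) (parts : List (List Char)) :
    parts.foldl (fun nums sub => match nums with
      | none => none
      | some ns => (parseA f sub).map (fun r => ns ++ r)) none = none := by
  induction parts with
  | nil => rfl
  | cons p rest ih => rw [List.foldl_cons]; exact ih

theorem foldlB_none (parts : List (List Char)) :
    parts.foldl stepB none = none := by
  induction parts with
  | nil => rfl
  | cons p rest ih => rw [List.foldl_cons]; exact ih

theorem fold_rel (f : Nat) (parts : List (List Char))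
    (h : ∀ p ∈ parts, ',' ∉ PySem.Chars.strip p) :
    ∀ (ns : List Int) (res : PySem.Set Int), res.Nodup → (∀ x, x ∈ res ↔ x ∈ ns) →
    (parts.foldl (fun nums sub => match nums with
        | none => none
        | some ns => (parseA (f + 2) sub).map (fun r => ns ++ r)) (some ns) = none ∧
     parts.foldl stepB (some res) = none) ∨
    (∃ ns' res',
      parts.foldl (fun nums sub => match nums with
        | none => none
        | some ns => (parseA (f + 2) sub).map (fun r => ns ++ r)) (some ns) = some ns' ∧
      parts.foldl stepB (some res) = some res' ∧ res'.Nodup ∧ (∀ x, x ∈ res' ↔ x ∈ ns')) := by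
  induction parts with
  | nil =>
    intro ns res hnd hmem
    exact Or.inr ⟨ns, res, rfl, rfl, hnd, hmem⟩
  | cons p rest ih =>
    intro ns res hnd hmem
    have hp := h p List.mem_cons_self
    have hrest : ∀ q ∈ rest, ',' ∉ PySem.Chars.strip q :=
      fun q hq => h q (List.mem_cons_of_mem p hq)
    rw [List.foldl_cons, List.foldl_cons]
    cases hpB : partB p with
    | none =>
      left
      constructor
      · have : (match some ns with
            | none => none
            | some ns => (parseA (f + 2) p).map (fun r => ns ++ r)) = none := by
          rw [parseA_part f p hp, hpB]; rfl
        rw [this]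
        exact foldlA_none (f + 2) rest
      · have : stepB (some res) p = none := by simp [stepB, hpB]
        rw [this]
        exact foldlB_none rest
    | some S =>
      have hstepA : (match some ns with
          | none => none
          | some ns => (parseA (f + 2) p).map (fun r => ns ++ r)) =
          some (ns ++ (if '^' ∈ PySem.Chars.strip p
            then PySem.List.sorted S (fun x => x) false else S)) := by
        rw [parseA_part f p hp, hpB]; rfl
      have hstepB : stepB (some res) p = some (PySem.Set.union res S) := by
        simp [stepB, hpB]
      rw [hstepA, hstepB]
      apply ih hrest
      · exact PySem.Set.nodup_union res S hnd
      · intro x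
        rw [PySem.Set.mem_union res S x, List.mem_append, hmem x]
        by_cases hcar : '^' ∈ PySem.Chars.strip p
        · rw [if_pos hcar]
          rw [(PySem.List.sorted_perm S (fun x => x) false).mem_iff]
        · rw [if_neg hcar]

theorem ports_agree (spec : String) : parse_nums spec = parse_nums_alt spec := by
  unfold parse_nums
  simp only [parse_nums_alt]
  by_cases hc : ',' ∈ PySem.Chars.strip spec.toList
  · rw [show spec.toList.length + 3 = (spec.toList.length + 2) + 1 from rfl, parseA]
    simp only [if_pos hc]
    have hsteps :
        (PySem.Chars.splitOn (PySem.Chars.strip spec.toList) [',']).foldl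
          (fun acc part => match acc with
            | none => none
            | some res =>
              match PySem.Chars.splitOn (PySem.Chars.strip part) ['^'] with
              | [] => none
              | q0 :: rest =>
                match pvAtomB (PySem.Chars.strip q0) with
                | none => none
                | some inc0 =>
                  (rest.foldl
                      (fun inc ex => match inc with
                        | none => none
                        | some i => (pvAtomB (PySem.Chars.strip ex)).map
                            (fun e => PySem.Set.diff i e))
                      (some inc0)).map (fun inc => PySem.Set.union res inc))
          (some (PySem.Set.empty : PySem.Set Int)) =
        (PySem.Chars.splitOn (PySem.Chars.strip spec.toList) [',']).foldl stepB
          (some (PySem.Set.empty : PySem.Set Int)) := by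
      apply PySem.List.foldl_congr_mem
      intro acc part _
      cases acc with
      | none => rfl
      | some res =>
        unfold stepB partB
        cases PySem.Chars.splitOn (PySem.Chars.strip part) ['^'] with
        | nil => rfl
        | cons q0 rest =>
          cases hb : pvAtomB (PySem.Chars.strip q0) <;> simp [hb]
    rw [hsteps]
    have hparts : ∀ p ∈ PySem.Chars.splitOn (PySem.Chars.strip spec.toList) [','],
        ',' ∉ PySem.Chars.strip p :=
      fun p hp hx => splitOn_sepfree hp (strip_subset ',' hx)
    rcases fold_rel spec.toList.length
        (PySem.Chars.splitOn (PySem.Chars.strip spec.toList) [',']) hparts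
        [] PySem.Set.empty (by simp [PySem.Set.empty]) (by simp [PySem.Set.empty]) with
      ⟨hA, hB⟩ | ⟨ns', res', hA, hB, hnd, hm⟩
    · rw [hA, hB]; rfl
    · rw [hA, hB]
      simp only [Option.getD_some]
      exact sorted_eq_of_nodup_mem_equiv (PySem.Set.nodup_ofList ns') hnd
        (fun x => by rw [PySem.Set.mem_ofList ns' x, ← hm x])
  · rw [show spec.toList.length + 3 = (spec.toList.length + 1) + 2 from rfl,
      parseA_part (spec.toList.length + 1) spec.toList hc]
    rw [splitOn_nosep hc, List.foldl_cons, List.foldl_nil]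
    have hone : (match some (PySem.Set.empty : PySem.Set Int) with
        | none => none
        | some res =>
          match PySem.Chars.splitOn (PySem.Chars.strip (PySem.Chars.strip spec.toList)) ['^'] with
          | [] => none
          | q0 :: rest =>
            match pvAtomB (PySem.Chars.strip q0) with
            | none => none
            | some inc0 =>
              (rest.foldl
                  (fun inc ex => match inc with
                    | none => none
                    | some i => (pvAtomB (PySem.Chars.strip ex)).map
                        (fun e => PySem.Set.diff i e))
                  (some inc0)).map (fun inc => PySem.Set.union res inc)) =
        (partB spec.toList).map (fun S => PySem.Set.union PySem.Set.empty S) := by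
      unfold partB
      rw [strip_idem]
      cases PySem.Chars.splitOn (PySem.Chars.strip spec.toList) ['^'] with
      | nil => rfl
      | cons q0 rest => cases hb : pvAtomB (PySem.Chars.strip q0) <;> simp [hb]
    rw [hone]
    cases hpB : partB spec.toList with
    | none => rfl
    | some S =>
      have hnd : S.Nodup := partB_nodup hpB
      have hUS : PySem.Set.union PySem.Set.empty S = S := by
        show PySem.Set.ofList S = S
        exact ofList_eq_self hnd
      simp only [Option.map_some, Option.getD_some, hUS]
      by_cases hcar : '^' ∈ PySem.Chars.strip spec.toList
      · rw [if_pos hcar]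
      · rw [if_neg hcar]
        exact (PySem.List.sorted_eq_of_perm_of_pairwise_lt S S (fun x => x)
          (List.Perm.refl S) (partB_nocaret_pairwise hcar hpB)).symm

-- ===== VERDICT (by name: the statement is the Claim_ definition above) =====
theorem parse_nums_spec : Claim_equal_parse_nums := by
  intro spec _ _
  unfold Spec_parse_nums
  exact ports_agree spec
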